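-- pv_equiv track=rewrite | github.com/Komdix/bekap_wins | bakap_nadruhu/kodikovanie/old/2nd_block/05/p5_course.py | check
-- ===== SOURCE A (Python) =====
-- def test(lst: list[str], type_of_exam: list[str]) -> bool:
--     test_flip = True
--     for element in lst:
--         if element in set(type_of_exam):
--             test_flip = True
--         else:
--             return False
--     return test_flip
--
-- def check(marks: dict[int, str]) -> bool:
--     lst = []
--     exam = ['A', 'B', 'C', 'D', 'E', 'F', 'X', '-']
--     koloqium = ['P', 'N', '-']
--     written_exam = ['Z', 'N', '-']
--     for element in marks.values():
--         lst.append(element)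
--     return test(lst, exam) or test(lst, koloqium) or test(lst, written_exam)
-- ===== SOURCE B (Python) =====
-- # One-pass bitmask intersection: each mark maps to the set of categories (as bits)
-- # it belongs to; AND them all together and check a common category survives.
-- CAT_MASK = {'A': 1, 'B': 1, 'C': 1, 'D': 1, 'E': 1, 'F': 1, 'X': 1,
--             'P': 2, 'Z': 4, 'N': 6, '-': 7}
--
-- def check(marks: dict[int, str]) -> bool:
--     mask = 7
--     for v in marks.values():
--         mask &= CAT_MASK.get(v, 0)
--     return mask != 0
-- ===== Notes on version B (the rewrite author's own statement) =====
-- stated objective: alternative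
-- what changed: Replaces A's copy-the-values loop plus three separate early-terminating membership scans with a single fold that intersects per-mark category bitmasks (a precomputed letter-to-bitmask table) and tests whether any common category bit survives.
import Mathlib
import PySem

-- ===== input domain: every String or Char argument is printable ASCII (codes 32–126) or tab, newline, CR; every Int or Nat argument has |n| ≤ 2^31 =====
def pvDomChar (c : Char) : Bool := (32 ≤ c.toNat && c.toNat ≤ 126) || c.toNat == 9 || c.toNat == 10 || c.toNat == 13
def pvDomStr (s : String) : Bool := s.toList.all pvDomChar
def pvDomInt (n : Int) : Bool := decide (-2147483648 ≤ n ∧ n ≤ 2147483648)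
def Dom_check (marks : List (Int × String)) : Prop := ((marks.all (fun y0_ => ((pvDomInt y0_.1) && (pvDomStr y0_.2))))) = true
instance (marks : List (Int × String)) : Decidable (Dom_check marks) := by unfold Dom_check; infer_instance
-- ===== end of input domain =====

-- B replaces A's three early-terminating membership scans of the value list with a
-- single fold intersecting per-mark category bitmasks: a different one-pass algorithm.

-- ===== PORT A =====
-- helper 'test': the loop with its test_flip flag, early return False on a miss
def checkTest (lst : List String) (type_of_exam : List String) : Bool :=
  checkTestLoop lst type_of_exam true
where
  checkTestLoop : List String → List String → Bool → Bool
  | [], _, test_flip => test_flip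
  | element :: rest, cat, _ =>
    if PySem.Set.contains (PySem.Set.ofList cat) element then
      checkTestLoop rest cat true
    else
      false

def check (marks : List (Int × String)) : Bool :=
  let exam := ["A", "B", "C", "D", "E", "F", "X", "-"]
  let koloqium := ["P", "N", "-"]
  let written_exam := ["Z", "N", "-"]
  let lst := ((PySem.Dict.ofList marks).values).foldl (fun acc element => acc ++ [element]) []
  checkTest lst exam || checkTest lst koloqium || checkTest lst written_exam

-- ===== PORT B =====
-- module-level CAT_MASK table of Source B
def catMask : PySem.Dict String Int :=
  PySem.Dict.ofList [("A", 1), ("B", 1), ("C", 1), ("D", 1), ("E", 1), ("F", 1), ("X", 1),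
                     ("P", 2), ("Z", 4), ("N", 6), ("-", 7)]

def check_alt (marks : List (Int × String)) : Bool :=
  let mask :=
    ((PySem.Dict.ofList marks).values).foldl
      (fun mask v => PySem.Int.band mask (PySem.Dict.getD catMask v 0)) 7
  mask != 0

-- ===== PRECONDITION & SPEC =====
def Spec_check (marks : List (Int × String)) (out : Bool) : Prop := out = check_alt marks
instance (marks : List (Int × String)) (out : Bool) : Decidable (Spec_check marks out) := by unfold Spec_check; infer_instance

-- ===== CLAIM =====
def Claim_equal_check : Prop := ∀ (marks : List (Int × String)), Dom_check marks → Spec_check marks (check marks)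

-- ===== LEMMAS AND PROOFS =====

-- mask built from the three Bool category flags
def maskBits (x y z : Bool) : Int :=
  (if x then 1 else 0) + (if y then 2 else 0) + (if z then 4 else 0)

theorem maskBits_ne_zero (x y z : Bool) : (maskBits x y z != 0) = (x || y || z) := by
  cases x <;> cases y <;> cases z <;> decide

-- one step of B's fold, in terms of the per-category membership flags
theorem band_maskOf (x y z : Bool) (v : String) :
    PySem.Int.band (maskBits x y z) (PySem.Dict.getD catMask v 0)
      = maskBits (x && decide (v ∈ ["A", "B", "C", "D", "E", "F", "X", "-"]))
                 (y && decide (v ∈ ["P", "N", "-"]))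
                 (z && decide (v ∈ ["Z", "N", "-"])) := by
  by_cases hA : v = "A"
  · subst hA; cases x <;> cases y <;> cases z <;> decide
  by_cases hB : v = "B"
  · subst hB; cases x <;> cases y <;> cases z <;> decide
  by_cases hC : v = "C"
  · subst hC; cases x <;> cases y <;> cases z <;> decide
  by_cases hD : v = "D"
  · subst hD; cases x <;> cases y <;> cases z <;> decide
  by_cases hE : v = "E"
  · subst hE; cases x <;> cases y <;> cases z <;> decide
  by_cases hF : v = "F"
  · subst hF; cases x <;> cases y <;> cases z <;> decide
  by_cases hX : v = "X"
  · subst hX; cases x <;> cases y <;> cases z <;> decide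
  by_cases hP : v = "P"
  · subst hP; cases x <;> cases y <;> cases z <;> decide
  by_cases hZ : v = "Z"
  · subst hZ; cases x <;> cases y <;> cases z <;> decide
  by_cases hN : v = "N"
  · subst hN; cases x <;> cases y <;> cases z <;> decide
  by_cases hH : v = "-"
  · subst hH; cases x <;> cases y <;> cases z <;> decide
  have hm : PySem.Dict.getD catMask v 0 = 0 := by
    have hcat : catMask = PySem.Dict.mk [("A", 1), ("B", 1), ("C", 1), ("D", 1), ("E", 1),
        ("F", 1), ("X", 1), ("P", 2), ("Z", 4), ("N", 6), ("-", 7)] := rfl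
    rw [hcat]
    simp [PySem.Dict.getD, Ne.symm hA, Ne.symm hB, Ne.symm hC,
      Ne.symm hD, Ne.symm hE, Ne.symm hF, Ne.symm hX, Ne.symm hP, Ne.symm hZ, Ne.symm hN,
      Ne.symm hH, PySem.Dict.get?]
  rw [hm]
  simp [hA, hB, hC, hD, hE, hF, hX, hP, hZ, hN, hH]
  cases x <;> cases y <;> cases z <;> decide

-- A's scan of lst equals "every element of lst is in cat"
theorem checkTestLoop_eq (lst cat : List String) :
    checkTest.checkTestLoop lst cat true = lst.all (fun e => decide (e ∈ cat)) := by
  induction lst with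
  | nil => simp [checkTest.checkTestLoop]
  | cons e rest ih =>
    simp only [checkTest.checkTestLoop, List.all_cons]
    by_cases h : e ∈ cat
    · simp [PySem.Set.contains, PySem.Set.mem_ofList, h, ih]
    · simp [PySem.Set.contains, PySem.Set.mem_ofList, h]

-- B's mask fold tracks the three "all in category" flags
theorem fold_band_eq (l : List String) (x y z : Bool) :
    l.foldl (fun mask v => PySem.Int.band mask (PySem.Dict.getD catMask v 0)) (maskBits x y z)
      = maskBits (x && l.all (fun e => decide (e ∈ ["A", "B", "C", "D", "E", "F", "X", "-"])))
                 (y && l.all (fun e => decide (e ∈ ["P", "N", "-"])))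
                 (z && l.all (fun e => decide (e ∈ ["Z", "N", "-"]))) := by
  induction l generalizing x y z with
  | nil => simp
  | cons v rest ih =>
    simp only [List.foldl_cons, List.all_cons, band_maskOf, ih, Bool.and_assoc]

theorem foldl_append_id (l : List String) :
    l.foldl (fun acc element => acc ++ [element]) [] = l :=
  PySem.List.foldl_append_singleton l []

-- ===== VERDICT =====
theorem check_spec : Claim_equal_check := by
  intro marks _
  unfold Spec_check check check_alt checkTest
  have h7 : (7 : Int) = maskBits true true true := by decide
  simp only [foldl_append_id, checkTestLoop_eq, h7, fold_band_eq, maskBits_ne_zero,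
    Bool.true_and]
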